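-- pv_equiv track=rewrite | github.com/techsharma04/CodingInvaders | Assignments/Module-35-Atul-Sharma-Python/Assignment 3.py | max_asc
-- ===== SOURCE A (Python) =====
-- def add(arr, l, r):
--     if l <= r:
--         sum = 0
--         for i in range(l, r + 1):
--             sum = sum + arr[i]
--         return sum
--
-- def max_asc(arr):
--     ascArr = []
--     if len(arr) < 2:
--         return arr[0]
--     for i in range(len(arr) - 1):
--         if arr[i] < arr[i + 1]:
--             left = right = i
--             while right + 1 < len(arr) and arr[right] < arr[right + 1]:
--                 right = right + 1
--             if right == len(arr) - 1:
--                 return add(arr, left, right)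
-- ===== SOURCE B (Python) =====
-- def max_asc(arr):
--     if len(arr) < 2:
--         return arr[0]
--     if arr[-2] >= arr[-1]:
--         return None
--     s = arr[-1]
--     i = len(arr) - 2
--     while i >= 0 and arr[i] < arr[i + 1]:
--         s += arr[i]
--         i -= 1
--     return s
-- ===== Notes on version B (the rewrite author's own statement) =====
-- stated objective: faster
-- what changed: Instead of trying every index and re-extending an ascending run forward from each (quadratic), B checks the last pair once and sums the ascending run ending at the last element in a single backward scan.
import Mathlib
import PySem

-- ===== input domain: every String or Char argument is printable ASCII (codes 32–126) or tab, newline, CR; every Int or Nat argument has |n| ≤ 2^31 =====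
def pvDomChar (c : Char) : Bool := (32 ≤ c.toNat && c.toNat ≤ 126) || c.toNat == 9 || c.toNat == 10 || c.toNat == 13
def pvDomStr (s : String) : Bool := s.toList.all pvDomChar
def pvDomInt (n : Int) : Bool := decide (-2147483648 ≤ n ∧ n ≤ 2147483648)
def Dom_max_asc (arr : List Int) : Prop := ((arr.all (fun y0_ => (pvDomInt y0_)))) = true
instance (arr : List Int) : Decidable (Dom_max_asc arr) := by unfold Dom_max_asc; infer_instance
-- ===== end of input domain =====

-- B replaces A's quadratic scan-and-extend search by a single backward pass over the
-- ascending run ending at the last element (objective: faster, asymptotic).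


-- ===== PORT A =====
-- helper add(arr, l, r): sum of arr[l..r] when l <= r, else Python's implicit None
def addA (arr : List Int) (l r : Nat) : Option Int :=
  if l ≤ r then
    some ((List.range' l (r + 1 - l)).foldl (fun s i => s + arr.getD i 0) 0)
  else none

-- the inner `while right + 1 < len(arr) and arr[right] < arr[right+1]` loop
def extendA (arr : List Int) (right : Nat) : Nat :=
  if _h : right + 1 < arr.length ∧ arr.getD right 0 < arr.getD (right + 1) 0 then
    extendA arr (right + 1)
  else right
termination_by arr.length - right
decreasing_by omega

-- the `for i in range(len(arr) - 1)` loop (fuel = remaining iterations; falls off → None)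
def forA (arr : List Int) (i : Nat) (fuel : Nat) : Option Int :=
  match fuel with
  | 0 => none
  | f + 1 =>
    if arr.getD i 0 < arr.getD (i + 1) 0 then
      let right := extendA arr i
      if right = arr.length - 1 then addA arr i right
      else forA arr (i + 1) f
    else forA arr (i + 1) f

def max_asc (arr : List Int) : Option Int :=
  if arr.length < 2 then PySem.List.pyGet? arr 0
  else forA arr 0 (arr.length - 1)

-- ===== PORT B =====
-- backward while loop: `while i >= 0 and arr[i] < arr[i+1]: s += arr[i]; i -= 1`
def sumBackB (arr : List Int) (i : Nat) (s : Int) : Int :=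
  if arr.getD i 0 < arr.getD (i + 1) 0 then
    match i with
    | 0 => s + arr.getD 0 0
    | j + 1 => sumBackB arr j (s + arr.getD (j + 1) 0)
  else s

def max_asc_alt (arr : List Int) : Option Int :=
  if arr.length < 2 then PySem.List.pyGet? arr 0
  else if arr.getD (arr.length - 1) 0 ≤ arr.getD (arr.length - 2) 0 then none
  else some (sumBackB arr (arr.length - 2) (arr.getD (arr.length - 1) 0))

-- ===== PRECONDITION & SPEC =====
-- Pre_ excludes only the empty list, on which A (and B) raise IndexError.
def Pre_max_asc (arr : List Int) : Prop := arr ≠ []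
instance (arr : List Int) : Decidable (Pre_max_asc arr) := by unfold Pre_max_asc; infer_instance
def pvWitness_max_asc : List Int := ([1, 2, 1, 2, 3])

def Spec_max_asc (arr : List Int) (out : Option Int) : Prop := out = max_asc_alt arr
instance (arr : List Int) (out : Option Int) : Decidable (Spec_max_asc arr out) := by unfold Spec_max_asc; infer_instance

-- ===== CLAIM (what is proved, stated in full; the proofs are below) =====
def Claim_equal_max_asc : Prop := ∀ (arr : List Int), Dom_max_asc arr → Pre_max_asc arr → Spec_max_asc arr (max_asc arr)

-- ===== LEMMAS AND PROOFS =====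

-- "arr is strictly ascending from index j to the end"
def AscFrom (arr : List Int) (j : Nat) : Prop :=
  ∀ m, j ≤ m → m + 1 < arr.length → arr.getD m 0 < arr.getD (m + 1) 0

theorem ascFrom_mono (arr : List Int) {j j' : Nat} (h : j ≤ j') (ha : AscFrom arr j) :
    AscFrom arr j' := fun m hm hlt => ha m (le_trans h hm) hlt

theorem exists_least {p : Nat → Prop} (h : ∃ n, p n) : ∃ n, p n ∧ ∀ m, m < n → ¬ p m := by
  obtain ⟨n, hn⟩ := h
  induction n using Nat.strong_induction_on with
  | _ n ih =>
    by_cases h' : ∃ m, m < n ∧ p m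
    · obtain ⟨m, hm, hpm⟩ := h'
      exact ih m hm hpm
    · push_neg at h'
      exact ⟨n, hn, h'⟩

theorem extendA_run (arr : List Int) (right : Nat) :
    ∀ m, right ≤ m → m < extendA arr right →
      m + 1 < arr.length ∧ arr.getD m 0 < arr.getD (m + 1) 0 := by
  induction right using extendA.induct (arr := arr) with
  | case1 right h ih =>
    intro m hm hlt
    rw [extendA, dif_pos h] at hlt
    rcases Nat.eq_or_lt_of_le hm with heq | hgt
    · subst heq; exact ⟨h.1, h.2⟩
    · exact ih m hgt hlt
  | case2 right h =>
    intro m hm hlt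
    rw [extendA, dif_neg h] at hlt
    omega

theorem extendA_reach (arr : List Int) (right : Nat)
    (ha : AscFrom arr right) (hle : right ≤ arr.length - 1) (hn : 2 ≤ arr.length) :
    extendA arr right = arr.length - 1 := by
  induction right using extendA.induct (arr := arr) with
  | case1 right h ih =>
    rw [extendA, dif_pos h]
    exact ih (ascFrom_mono arr (by omega) ha) (by omega)
  | case2 right h =>
    rw [extendA, dif_neg h]
    by_contra hne
    have h1 : right + 1 < arr.length := by omega
    exact h ⟨h1, ha right le_rfl h1⟩

-- if A's extend loop reaches the last index from i ≤ n-2, the last pair ascends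
theorem extendA_end_last (arr : List Int) (i : Nat) (hn : 2 ≤ arr.length)
    (hi : i ≤ arr.length - 2) (he : extendA arr i = arr.length - 1) :
    arr.getD (arr.length - 2) 0 < arr.getD (arr.length - 1) 0 := by
  have := extendA_run arr i (arr.length - 2) (by omega) (by omega)
  have h2 : arr.length - 2 + 1 = arr.length - 1 := by omega
  rw [h2] at this
  exact this.2

theorem forA_none (arr : List Int) (hn : 2 ≤ arr.length)
    (hend : ¬ arr.getD (arr.length - 2) 0 < arr.getD (arr.length - 1) 0) :
    ∀ f i, i + f ≤ arr.length - 1 → forA arr i f = none := by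
  intro f
  induction f with
  | zero => intro i _; rfl
  | succ f ih =>
    intro i hif
    rw [forA]
    by_cases hc : arr.getD i 0 < arr.getD (i + 1) 0
    · simp only [hc, if_pos]
      have hre : ¬ extendA arr i = arr.length - 1 := by
        intro he
        exact hend (extendA_end_last arr i hn (by omega) he)
      simp only [hre]
      exact ih (i + 1) (by omega)
    · simp only [hc]
      exact ih (i + 1) (by omega)

theorem forA_some (arr : List Int) (k : Nat) (hn : 2 ≤ arr.length)
    (hk : AscFrom arr k) (hmin : ∀ j, j < k → ¬ AscFrom arr j) (hk2 : k ≤ arr.length - 2) :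
    ∀ f i, i ≤ k → k - i < f → forA arr i f = addA arr k (arr.length - 1) := by
  intro f
  induction f with
  | zero => intro i _ h; omega
  | succ f ih =>
    intro i hik hfuel
    rw [forA]
    rcases Nat.eq_or_lt_of_le hik with heq | hlt
    · subst heq
      have hc : arr.getD i 0 < arr.getD (i + 1) 0 := hk i le_rfl (by omega)
      simp only [hc, if_pos]
      have hre : extendA arr i = arr.length - 1 :=
        extendA_reach arr i hk (by omega) hn
      simp only [hre, if_pos]
    · have hre : ¬ extendA arr i = arr.length - 1 := by
        intro he
        apply hmin i hlt
        intro m hm hmlt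
        exact (extendA_run arr i m hm (by rw [he]; omega)).2
      by_cases hc : arr.getD i 0 < arr.getD (i + 1) 0
      · simp only [hc, if_pos, hre]
        exact ih (i + 1) (by omega) (by omega)
      · simp only [hc]
        exact ih (i + 1) (by omega) (by omega)

theorem foldl_add_getD (arr : List Int) (l : List Nat) (c : Int) :
    l.foldl (fun s i => s + arr.getD i 0) c = c + (l.map (fun i => arr.getD i 0)).sum := by
  induction l generalizing c with
  | nil => simp
  | cons x xs ih =>
    rw [List.foldl_cons, ih]
    simp only [List.map_cons, List.sum_cons]
    ring

theorem sumBackB_spec (arr : List Int) (k : Nat)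
    (hk : AscFrom arr k) (hmin : ∀ j, j < k → ¬ AscFrom arr j) :
    ∀ i s, k ≤ i + 1 → i + 1 ≤ arr.length - 1 →
      sumBackB arr i s =
        s + ((List.range' k (i + 1 - k)).map (fun m => arr.getD m 0)).sum := by
  have hstop : ∀ (hk1 : 1 ≤ k), ¬ arr.getD (k - 1) 0 < arr.getD k 0 := by
    intro hk1 hcl
    apply hmin (k - 1) (by omega)
    intro m hm hmlt
    rcases Nat.eq_or_lt_of_le hm with heq | hgt
    · have e1 : m = k - 1 := heq.symm
      have e2 : k - 1 + 1 = k := by omega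
      rw [e1, e2]; exact hcl
    · exact hk m (by omega) hmlt
  intro i
  induction i with
  | zero =>
    intro s hk1 hlen
    rcases Nat.lt_or_ge k 1 with h0 | h1
    · have hk0 : k = 0 := by omega
      subst hk0
      have hc : arr.getD 0 0 < arr.getD (0 + 1) 0 := hk 0 le_rfl (by omega)
      rw [sumBackB, if_pos hc]
      simp [List.range']
    · have hk1' : k = 1 := by omega
      subst hk1'
      have hc : ¬ arr.getD 0 0 < arr.getD (0 + 1) 0 := by
        have := hstop le_rfl
        simpa using this
      rw [sumBackB, if_neg hc]
      simp
  | succ j ih =>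
    intro s hk1 hlen
    rcases Nat.lt_or_ge k (j + 2) with hlt | hge
    · -- k ≤ j + 1 : loop condition holds, recurse
      have hc : arr.getD (j + 1) 0 < arr.getD (j + 1 + 1) 0 := hk (j + 1) (by omega) (by omega)
      rw [sumBackB, if_pos hc]
      rw [ih (s + arr.getD (j + 1) 0) (by omega) (by omega)]
      have hsplit : List.range' k (j + 2 - k) = List.range' k (j + 1 - k) ++ [j + 1] := by
        have h1 : j + 2 - k = (j + 1 - k) + 1 := by omega
        rw [h1, List.range'_concat]
        congr 2
        omega
      rw [hsplit]
      simp only [List.map_append, List.sum_append, List.map_cons, List.map_nil,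
        List.sum_cons, List.sum_nil]
      ring
    · -- k = j + 2 : loop condition fails
      have hke : k = j + 2 := by omega
      subst hke
      have hc : ¬ arr.getD (j + 1) 0 < arr.getD (j + 1 + 1) 0 := by
        have := hstop (by omega)
        have h2 : j + 2 - 1 = j + 1 := by omega
        rw [h2] at this
        simpa using this
      rw [sumBackB, if_neg hc]
      simp

theorem max_asc_eq (arr : List Int) (_hne : arr ≠ []) : max_asc arr = max_asc_alt arr := by
  unfold max_asc max_asc_alt
  by_cases hn : arr.length < 2
  · simp [hn]
  · simp only [hn]
    push_neg at hn
    by_cases hend : arr.getD (arr.length - 2) 0 < arr.getD (arr.length - 1) 0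
    · -- ascending tail: both return the sum of the run ending at the last element
      have hle : ¬ arr.getD (arr.length - 1) 0 ≤ arr.getD (arr.length - 2) 0 := by omega
      simp only [hle, if_neg]
      obtain ⟨k, hk, hmin⟩ := exists_least (p := AscFrom arr)
        ⟨arr.length - 1, fun m hm hmlt => by omega⟩
      have hk2 : k ≤ arr.length - 2 := by
        by_contra hgt
        apply hmin (arr.length - 2) (by omega)
        intro m hm hmlt
        have hme : m = arr.length - 2 := by omega
        subst hme
        have : arr.length - 2 + 1 = arr.length - 1 := by omega
        rw [this]; exact hend
      rw [forA_some arr k hn hk hmin hk2 (arr.length - 1) 0 (by omega) (by omega)]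
      unfold addA
      have hkle : k ≤ arr.length - 1 := by omega
      simp only [hkle, if_pos]
      rw [foldl_add_getD,
        sumBackB_spec arr k hk hmin (arr.length - 2) (arr.getD (arr.length - 1) 0)
          (by omega) (by omega)]
      have hsplit : List.range' k (arr.length - 1 + 1 - k)
          = List.range' k (arr.length - 2 + 1 - k) ++ [arr.length - 1] := by
        have h1 : arr.length - 1 + 1 - k = (arr.length - 2 + 1 - k) + 1 := by omega
        rw [h1, List.range'_concat]
        congr 2
        omega
      rw [hsplit]
      simp [add_comm]
    · -- non-ascending last pair: both return none
      have hle : arr.getD (arr.length - 1) 0 ≤ arr.getD (arr.length - 2) 0 := by omega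
      simp only [hle, if_pos]
      exact forA_none arr hn hend (arr.length - 1) 0 (by omega)

-- ===== VERDICT (by name: the statement is the Claim_ definition above) =====
theorem max_asc_spec : Claim_equal_max_asc := by
  intro arr _ hpre
  unfold Spec_max_asc
  exact max_asc_eq arr hpre
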